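-- pv_equiv track=rewrite | github.com/kostya13/cellular-automaton | cell.py | iter_state
-- ===== SOURCE A (Python) =====
-- def iter_state(field):
--     f_len = len(field)
--     for i in range(f_len):
--         left = (i - 1) % f_len
--         midlle = i
--         right = (i + 1) % f_len
--         values = (field[i] for i in (left, midlle, right))
--         yield '{}{}{}'.format(*values)
-- ===== SOURCE B (Python) =====
-- def iter_state(field):
--     if not field:
--         return
--     lefts = field[-1:] + field[:-1]
--     rights = field[1:] + field[:1]
--     yield from map('{}{}{}'.format, lefts, field, rights)
-- ===== Notes on version B (the rewrite author's own statement) =====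
-- stated objective: idiomatic
-- what changed: Replaces A's index loop with per-iteration modular arithmetic by zipping the list with its two rotations (rotated right and rotated left) and mapping str.format over the three parallel sequences - no indexing or modulus at all, which also removes the per-element index/mod overhead.
import Mathlib
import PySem

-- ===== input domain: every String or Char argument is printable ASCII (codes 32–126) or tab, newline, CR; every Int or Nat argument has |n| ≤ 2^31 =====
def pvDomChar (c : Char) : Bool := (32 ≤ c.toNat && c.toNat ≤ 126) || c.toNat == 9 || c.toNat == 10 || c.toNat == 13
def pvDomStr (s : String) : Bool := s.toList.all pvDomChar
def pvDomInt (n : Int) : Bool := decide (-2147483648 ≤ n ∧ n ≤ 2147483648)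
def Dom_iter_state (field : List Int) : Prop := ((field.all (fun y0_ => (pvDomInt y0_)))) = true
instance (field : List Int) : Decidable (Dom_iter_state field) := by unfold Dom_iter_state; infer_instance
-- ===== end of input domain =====

-- B drops A's index loop with per-index modular arithmetic: it zips the list with its two
-- rotations and maps the formatter over the three parallel sequences (idiomatic decomposition).

-- ===== PORT A =====
-- literal port of A: for i in range(len(field)): indices (i-1)%n, i, (i+1)%n
def iter_state (field : List Int) : List String :=
  let f_len : Int := field.length
  (PySem.List.pyRange 0 f_len 1).map (fun i =>
    let left := PySem.Int.mod (i - 1) f_len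
    let middle := i
    let right := PySem.Int.mod (i + 1) f_len
    PySem.Int.toStr (PySem.List.pyGetD field left 0)
      ++ PySem.Int.toStr (PySem.List.pyGetD field middle 0)
      ++ PySem.Int.toStr (PySem.List.pyGetD field right 0))

-- ===== PORT B =====
-- literal port of B: empty guard; lefts = field[-1:]+field[:-1]; rights = field[1:]+field[:1];
-- map('{}{}{}'.format, lefts, field, rights) = zipWith3 of the three parallel sequences
def iter_state_alt (field : List Int) : List String :=
  match field with
  | [] => []
  | _ :: _ =>
    let lefts := PySem.List.slice field (some (-1)) none ++ PySem.List.slice field none (some (-1))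
    let rights := PySem.List.slice field (some 1) none ++ PySem.List.slice field none (some 1)
    List.zipWith3 (fun a b c => PySem.Int.toStr a ++ PySem.Int.toStr b ++ PySem.Int.toStr c)
      lefts field rights

-- ===== PRECONDITION & SPEC =====
def Spec_iter_state (field : List Int) (out : List String) : Prop := out = iter_state_alt field
instance (field : List Int) (out : List String) : Decidable (Spec_iter_state field out) := by unfold Spec_iter_state; infer_instance

-- ===== CLAIM =====
def Claim_equal_iter_state : Prop := ∀ (field : List Int), Dom_iter_state field → Spec_iter_state field (iter_state field)

-- ===== LEMMAS AND PROOFS =====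

theorem pv_zipWith3_length {α β γ δ : Type} (f : α → β → γ → δ) :
    ∀ (a : List α) (b : List β) (c : List γ),
      (List.zipWith3 f a b c).length = min a.length (min b.length c.length) := by
  intro a
  induction a with
  | nil => intro b c; simp [List.zipWith3]
  | cons x xs ih =>
    intro b c
    cases b with
    | nil => simp [List.zipWith3]
    | cons y ys =>
      cases c with
      | nil => simp [List.zipWith3]
      | cons z zs => simp [List.zipWith3, ih]

theorem pv_zipWith3_getElem {α β γ δ : Type} (f : α → β → γ → δ) :
    ∀ (a : List α) (b : List β) (c : List γ) (i : Nat)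
      (h1 : i < a.length) (h2 : i < b.length) (h3 : i < c.length)
      (h4 : i < (List.zipWith3 f a b c).length),
      GetElem.getElem (List.zipWith3 f a b c) i h4
        = f (GetElem.getElem a i h1) (GetElem.getElem b i h2) (GetElem.getElem c i h3) := by
  intro a
  induction a with
  | nil => intro b c i h1 _ _ _; simp at h1
  | cons x xs ih =>
    intro b c i h1 h2 h3 h4
    cases b with
    | nil => simp at h2
    | cons y ys =>
      cases c with
      | nil => simp at h3
      | cons z zs =>
        cases i with
        | zero => simp [List.zipWith3]
        | succ j =>
          simp only [List.zipWith3, List.getElem_cons_succ]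
          exact ih ys zs j (by simpa using h1) (by simpa using h2) (by simpa using h3)
            (by simpa [List.zipWith3] using h4)

-- ===== VERDICT =====
theorem iter_state_spec : Claim_equal_iter_state := by
  intro field _
  unfold Spec_iter_state iter_state
  rcases field with _ | ⟨x, rest⟩
  · rfl
  · rw [show iter_state_alt (x :: rest)
        = List.zipWith3 (fun a b c => PySem.Int.toStr a ++ PySem.Int.toStr b ++ PySem.Int.toStr c)
            (PySem.List.slice (x :: rest) (some (-1)) none
              ++ PySem.List.slice (x :: rest) none (some (-1)))
            (x :: rest)
            (PySem.List.slice (x :: rest) (some 1) none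
              ++ PySem.List.slice (x :: rest) none (some 1)) from rfl]
    set f := x :: rest with hf
    have hlen : f.length = rest.length + 1 := by simp [hf]
    have hpos : 0 < f.length := by omega
    have hlefts : PySem.List.slice f (some (-1)) none ++ PySem.List.slice f none (some (-1))
        = f.drop (f.length - 1) ++ f.dropLast := by
      rw [PySem.List.slice_from_neg_one, PySem.List.slice_to_neg_one]
    have hrights : PySem.List.slice f (some 1) none ++ PySem.List.slice f none (some 1)
        = f.tail ++ f.take 1 := by
      rw [PySem.List.slice_from_one,
          show PySem.List.slice f none (some 1) = f.take 1 from by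
            simpa using PySem.List.slice_to_natCast f 1]
    rw [hlefts, hrights]
    have hLl : (f.drop (f.length - 1) ++ f.dropLast).length = f.length := by
      simp
    have hRl : (f.tail ++ f.take 1).length = f.length := by
      simp
      omega
    apply List.ext_getElem
    · rw [List.length_map, PySem.List.length_pyRange_one, pv_zipWith3_length, hLl, hRl]
      simp <;> omega
    · intro i hi1 hi2
      have hin : i < f.length := by
        simp only [List.length_map, PySem.List.length_pyRange_one] at hi1
        omega
      rw [List.getElem_map, PySem.List.getElem_pyRange_one]
      rw [pv_zipWith3_getElem _ _ _ _ i (by omega) hin (by omega) hi2]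
      simp only [zero_add]
      have hmid : PySem.List.pyGetD f (i : Int) 0 = f[i]'hin := by
        rw [PySem.List.pyGetD_eq_getElem _ 0 (by omega) (by omega)]
        exact getElem_congr rfl (by omega) _
      have hleft : PySem.List.pyGetD f (PySem.Int.mod ((i : Int) - 1) (f.length : Int)) 0
          = (f.drop (f.length - 1) ++ f.dropLast)[i]'(by omega) := by
        rw [PySem.Int.mod_eq_emod_of_pos (by exact_mod_cast hpos)]
        rcases Nat.eq_zero_or_pos i with h0 | h0
        · subst h0
          simp only [Nat.cast_zero]
          have e1 : ((0 : Int) - 1) % (f.length : Int) = (f.length : Int) - 1 := by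
            have h2 : ((0 : Int) - 1) = ((f.length : Int) - 1) + (f.length : Int) * (-1) := by ring
            rw [h2, Int.add_mul_emod_self_left, Int.emod_eq_of_lt (by omega) (by omega)]
          rw [e1, PySem.List.pyGetD_eq_getElem _ 0 (by omega) (by omega),
              List.getElem_append_left (by simp <;> omega), List.getElem_drop]
          exact getElem_congr rfl (by omega) _
        · have e2 : ((i : Int) - 1) % (f.length : Int) = (i : Int) - 1 :=
            Int.emod_eq_of_lt (by omega) (by omega)
          rw [e2, PySem.List.pyGetD_eq_getElem _ 0 (by omega) (by omega),
              List.getElem_append_right (by simp <;> omega), List.getElem_dropLast]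
          exact getElem_congr rfl (by simp <;> omega) _
      have hright : PySem.List.pyGetD f (PySem.Int.mod ((i : Int) + 1) (f.length : Int)) 0
          = (f.tail ++ f.take 1)[i]'(by omega) := by
        rw [PySem.Int.mod_eq_emod_of_pos (by exact_mod_cast hpos)]
        rcases Nat.lt_or_ge (i + 1) f.length with h | h
        · have e3 : ((i : Int) + 1) % (f.length : Int) = (i : Int) + 1 :=
            Int.emod_eq_of_lt (by omega) (by omega)
          rw [e3, PySem.List.pyGetD_eq_getElem _ 0 (by omega) (by omega),
              List.getElem_append_left (by simp <;> omega), List.getElem_tail]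
          exact getElem_congr rfl (by omega) _
        · have e4 : ((i : Int) + 1) % (f.length : Int) = 0 := by
            have h5 : (i : Int) + 1 = (f.length : Int) := by omega
            rw [h5, Int.emod_self]
          rw [e4, PySem.List.pyGetD_eq_getElem _ 0 (by omega) (by exact_mod_cast hpos),
              List.getElem_append_right (by simp <;> omega), List.getElem_take]
          exact getElem_congr rfl (by simp <;> omega) _
      rw [hmid, hleft, hright]
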